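-- pv_equiv track=rewrite | github.com/yogitharayapureddy/codemind-python | Policemen_and_thieves.py | solution
-- ===== SOURCE A (Python) =====
-- def solution(A,K):
--     count=0
--     for i in range(len(A)):
--         ex=0
--         while "P" in A[i]:
--             Pj=A[i].index("P")
--             if "T" in A[i]:
--                 Tj=A[i].index("T")
--                 dist=abs(Tj-Pj)
--                 ex=min(Tj,Pj)
--                 if dist<=K:
--                     count+=1
--                     A[i][Pj]="X"
--                     A[i][Tj]="X"
--                     A[i]=A[i][ex+1:]
--                 else:
--                     A[i][ex]="X"
--             else:
--                 break
--     return count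
-- ===== SOURCE B (Python) =====
-- def solution(A, K):
--     # Return-value equivalent to A (A mutates its rows in place; B does not).
--     count = 0
--     for row in A:
--         ps = []
--         ts = []
--         i = 0
--         for x in row:
--             if x == "P":
--                 ps.append(i)
--             if x == "T":
--                 ts.append(i)
--             i += 1
--         i = 0
--         j = 0
--         while i < len(ps) and j < len(ts):
--             if abs(ps[i] - ts[j]) <= K:
--                 count += 1
--                 i += 1
--                 j += 1
--             elif ps[i] < ts[j]:
--                 i += 1
--             else:
--                 j += 1
--     return count
-- ===== Notes on version B (the rewrite author's own statement) =====
-- stated objective: alternative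
-- what changed: Replaces the per-row while loop that repeatedly rescans the row with list.index/'in' and reslices it, by one enumeration pass collecting P and T positions followed by a two-pointer greedy merge over the two position lists.
import Mathlib
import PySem

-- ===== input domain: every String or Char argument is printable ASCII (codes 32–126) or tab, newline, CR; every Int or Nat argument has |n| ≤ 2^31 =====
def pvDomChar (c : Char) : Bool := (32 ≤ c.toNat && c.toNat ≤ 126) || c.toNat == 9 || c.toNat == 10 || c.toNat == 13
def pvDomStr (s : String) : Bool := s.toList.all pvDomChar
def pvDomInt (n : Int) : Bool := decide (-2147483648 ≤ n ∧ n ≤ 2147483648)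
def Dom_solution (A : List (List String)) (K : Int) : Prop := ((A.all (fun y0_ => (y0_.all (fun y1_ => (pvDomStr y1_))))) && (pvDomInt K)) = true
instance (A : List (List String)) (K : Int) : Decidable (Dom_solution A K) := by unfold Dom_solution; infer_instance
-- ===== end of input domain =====

-- B replaces A's per-row while loop, which rescans the row with 'in'/list.index and
-- reslices it, by one enumeration pass collecting the P and T positions plus a
-- two-pointer merge over the two position lists. A mutates its rows in place; the
-- equivalence proved here is about the RETURN value only (B does not mutate).

-- ===== PORT A =====
-- posAux (B-side helper, defined here because loopA's termination measure uses it):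
-- the positions at which string a occurs, counting from n.
def posAux (a : String) (n : Nat) : List String → List Nat
  | [] => []
  | x :: xs => if x = a then n :: posAux a (n + 1) xs else posAux a (n + 1) xs

-- facts about posAux cited by loopA's termination proof (decreasing_by) below
theorem posAux_shift (a : String) (n : Nat) (l : List String) :
    posAux a n l = (posAux a 0 l).map (n + ·) := by
  induction l generalizing n with
  | nil => simp [posAux]
  | cons x xs ih =>
    simp only [posAux]
    by_cases hx : x = a <;>
      simp [hx, ih (n+1), ih 1, List.map_map, Function.comp_def, Nat.add_assoc, Nat.add_comm 1]

theorem index?_eq_head (a : String) (l : List String) :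
    PySem.List.index? l a = (posAux a 0 l).head? := by
  induction l with
  | nil => simp [posAux, PySem.List.index?]
  | cons x xs ih =>
    by_cases hx : x = a
    · subst hx
      rw [PySem.List.index?_cons_self]
      simp [posAux]
    · rw [PySem.List.index?_cons_of_ne xs hx, ih]
      simp only [posAux, if_neg hx, posAux_shift a 1]
      cases posAux a 0 xs <;> simp [Nat.add_comm]

theorem mem_pos_iff (a : String) (l : List String) (m : Nat) :
    m ∈ posAux a 0 l ↔ l[m]? = some a := by
  induction l generalizing m with
  | nil => simp [posAux]
  | cons x xs ih =>
    simp only [posAux]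
    rw [posAux_shift a 1]
    by_cases hx : x = a
    · cases m with
      | zero => simp [hx]
      | succ k => simp [hx, ih, Nat.add_comm]
    · cases m with
      | zero => simpa [hx] using Ne.symm hx
      | succ k => simp [hx, ih, Nat.add_comm]

theorem pos_set (a b : String) (l : List String) (j : Nat) (hj : j < l.length) (hba : b ≠ a) :
    posAux a 0 (l.set j b) = (posAux a 0 l).filter (fun m => m ≠ j) := by
  induction l generalizing j with
  | nil => simp at hj
  | cons x xs ih =>
    cases j with
    | zero =>
      simp only [List.set_cons_zero, posAux, if_neg hba, posAux_shift a 1]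
      by_cases hx : x = a <;>
        simp [hx, List.filter_map, Function.comp_def]
    | succ k =>
      have hk : k < xs.length := by simpa using hj
      have hfc : ∀ (L : List Nat),
          (L.map (fun x => 1 + x)).filter (fun m => decide (m ≠ k + 1)) =
            (L.filter (fun m => decide (m ≠ k))).map (fun x => 1 + x) := by
        intro L
        rw [List.filter_map]
        congr 1
        apply List.filter_congr
        intro m _
        simp only [Function.comp_apply, decide_eq_decide]
        omega
      simp only [List.set_cons_succ, posAux, posAux_shift a 1, ih k hk]
      by_cases hx : x = a
      · rw [if_pos hx, if_pos hx, List.filter_cons]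
        simp only [show (decide ((0:Nat) ≠ k + 1)) = true by simp, if_pos, hfc]
      · rw [if_neg hx, if_neg hx, hfc]

theorem pos_drop (a : String) (d : Nat) (l : List String) :
    posAux a 0 (l.drop d) = ((posAux a 0 l).filter (fun m => d ≤ m)).map (· - d) := by
  induction d generalizing l with
  | zero => simp
  | succ e ih =>
    cases l with
    | nil => simp [posAux]
    | cons x xs =>
      have : (x :: xs).drop (e + 1) = xs.drop e := by simp
      rw [this, ih xs]
      simp only [posAux, posAux_shift a 1]
      by_cases hx : x = a <;>
        simp [hx, List.filter_map, Function.comp_def, List.map_map, Nat.add_comm 1]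

theorem pos_cons_of_index? (a : String) (row : List String) (j : Nat)
    (h : PySem.List.index? row a = some j) :
    ∃ t, posAux a 0 row = j :: t := by
  rw [index?_eq_head] at h
  cases hc : posAux a 0 row with
  | nil => rw [hc] at h; simp at h
  | cons y t => rw [hc] at h; simp at h; exact ⟨t, by rw [h]⟩

theorem getElem?_of_index? (a : String) (row : List String) (j : Nat)
    (h : PySem.List.index? row a = some j) : row[j]? = some a := by
  obtain ⟨t, hc⟩ := pos_cons_of_index? a row j h
  exact (mem_pos_iff a row j).1 (by rw [hc]; exact List.mem_cons_self)

theorem lt_length_of_index? (a : String) (row : List String) (j : Nat)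
    (h : PySem.List.index? row a = some j) : j < row.length := by
  have := getElem?_of_index? a row j h
  exact (List.getElem?_eq_some_iff.1 this).1

theorem len_filter_ne_lt (j : Nat) (S : List Nat) (h : j ∈ S) :
    (S.filter (fun m => m ≠ j)).length < S.length := by
  exact List.length_filter_lt_length_iff_exists.mpr ⟨j, h, by simp⟩

theorem loopA_dec_match (K : Int) (row : List String) (Pj Tj : Nat)
    (hp : PySem.List.index? row "P" = some Pj)
    (ht : PySem.List.index? row "T" = some Tj) :
    (posAux "P" 0 (PySem.List.slice ((row.set Pj "X").set Tj "X") (some ((min Tj Pj + 1 : Nat) : Int)) none)).length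
      + (posAux "T" 0 (PySem.List.slice ((row.set Pj "X").set Tj "X") (some ((min Tj Pj + 1 : Nat) : Int)) none)).length
    < (posAux "P" 0 row).length + (posAux "T" 0 row).length := by
  have hPl : Pj < row.length := lt_length_of_index? _ _ _ hp
  have hTl : Tj < (row.set Pj "X").length := by simpa using lt_length_of_index? _ _ _ ht
  have hPmem : Pj ∈ posAux "P" 0 row := by
    obtain ⟨t, hc⟩ := pos_cons_of_index? _ _ _ hp; rw [hc]; exact List.mem_cons_self
  have hTmem : Tj ∈ posAux "T" 0 row := by
    obtain ⟨t, hc⟩ := pos_cons_of_index? _ _ _ ht; rw [hc]; exact List.mem_cons_self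
  have hne : Tj ≠ Pj := by
    intro hEq
    have h1 := getElem?_of_index? _ _ _ hp
    have h2 := getElem?_of_index? _ _ _ ht
    rw [hEq] at h2; rw [h1] at h2; simp at h2
  have key : ∀ x : String, "X" ≠ x →
      (posAux x 0 (PySem.List.slice ((row.set Pj "X").set Tj "X") (some ((min Tj Pj + 1 : Nat) : Int)) none)).length
        ≤ ((posAux x 0 row).filter (fun m => m ≠ Tj) |>.filter (fun m => m ≠ Pj)).length := by
    intro x hx
    rw [PySem.List.slice_from_natCast, pos_drop, pos_set _ _ _ _ hTl hx,
        pos_set _ _ _ _ hPl hx]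
    calc _ = ((((posAux x 0 row).filter (fun m => m ≠ Pj)).filter (fun m => m ≠ Tj)).filter
              (fun m => min Tj Pj + 1 ≤ m)).length := by rw [List.length_map]
      _ ≤ (((posAux x 0 row).filter (fun m => m ≠ Pj)).filter (fun m => m ≠ Tj)).length :=
          List.length_filter_le _ _
      _ = _ := by rw [List.filter_comm]
  have hP2 : ((posAux "P" 0 row).filter (fun m => m ≠ Tj) |>.filter (fun m => m ≠ Pj)).length
      < (posAux "P" 0 row).length := by
    calc _ < ((posAux "P" 0 row).filter (fun m => m ≠ Tj)).length :=
          len_filter_ne_lt Pj _ (by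
            simp only [List.mem_filter]
            exact ⟨hPmem, by simpa using Ne.symm hne⟩)
      _ ≤ _ := List.length_filter_le _ _
  have hT2 : ((posAux "T" 0 row).filter (fun m => m ≠ Tj) |>.filter (fun m => m ≠ Pj)).length
      < (posAux "T" 0 row).length := by
    calc _ ≤ ((posAux "T" 0 row).filter (fun m => m ≠ Tj)).length := List.length_filter_le _ _
      _ < _ := len_filter_ne_lt Tj _ hTmem
  have := key "P" (by decide); have := key "T" (by decide)
  omega

theorem loopA_dec_nomatch (K : Int) (row : List String) (Pj Tj : Nat)
    (hp : PySem.List.index? row "P" = some Pj)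
    (ht : PySem.List.index? row "T" = some Tj) :
    (posAux "P" 0 (row.set (min Tj Pj) "X")).length
      + (posAux "T" 0 (row.set (min Tj Pj) "X")).length
    < (posAux "P" 0 row).length + (posAux "T" 0 row).length := by
  have hPl : Pj < row.length := lt_length_of_index? _ _ _ hp
  have hTl : Tj < row.length := lt_length_of_index? _ _ _ ht
  have hPmem : Pj ∈ posAux "P" 0 row := by
    obtain ⟨t, hc⟩ := pos_cons_of_index? _ _ _ hp; rw [hc]; exact List.mem_cons_self
  have hTmem : Tj ∈ posAux "T" 0 row := by
    obtain ⟨t, hc⟩ := pos_cons_of_index? _ _ _ ht; rw [hc]; exact List.mem_cons_self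
  have hmin : min Tj Pj < row.length := by omega
  rw [pos_set "P" "X" _ _ hmin (by decide), pos_set "T" "X" _ _ hmin (by decide)]
  rcases min_cases Tj Pj with ⟨hm, _⟩ | ⟨hm, _⟩
  · have h1 := len_filter_ne_lt (min Tj Pj) (posAux "T" 0 row) (by rw [hm]; exact hTmem)
    have h2 := List.length_filter_le (fun m => m ≠ min Tj Pj) (posAux "P" 0 row)
    omega
  · have h1 := len_filter_ne_lt (min Tj Pj) (posAux "P" 0 row) (by rw [hm]; exact hPmem)
    have h2 := List.length_filter_le (fun m => m ≠ min Tj Pj) (posAux "T" 0 row)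
    omega

-- the 'while "P" in A[i]' body of A, carrying the running count; indices returned by
-- list.index are in range, so Python's A[i][Pj]="X" is exactly List.set
def loopA (K : Int) (row : List String) (count : Int) : Int :=
  if hP : "P" ∈ row then
    match hp : PySem.List.index? row "P" with
    | none => count  -- unreachable: "P" ∈ row
    | some Pj =>
      if hT : "T" ∈ row then
        match ht : PySem.List.index? row "T" with
        | none => count  -- unreachable: "T" ∈ row
        | some Tj =>
          let dist : Int := |(Tj : Int) - (Pj : Int)|
          let ex : Nat := min Tj Pj
          if dist ≤ K then
            loopA K (PySem.List.slice ((row.set Pj "X").set Tj "X") (some ((ex + 1 : Nat) : Int)) none) (count + 1)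
          else
            loopA K (row.set ex "X") count
      else count
  else count
termination_by (posAux "P" 0 row).length + (posAux "T" 0 row).length
decreasing_by
  · exact loopA_dec_match K row Pj Tj hp ht
  · exact loopA_dec_nomatch K row Pj Tj hp ht

def solution (A : List (List String)) (K : Int) : Int :=
  A.foldl (fun count row => loopA K row count) 0

-- ===== PORT B =====
-- B's while loop over the two position lists (its running indices i, j become the
-- structural recursion on the lists)
def tp (K : Int) : List Nat → List Nat → Int
  | p :: ps, t :: ts =>
    if |(p : Int) - (t : Int)| ≤ K then 1 + tp K ps ts
    else if p < t then tp K ps (t :: ts)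
    else tp K (p :: ps) ts
  | _, _ => 0
termination_by ps ts => ps.length + ts.length

def solution_alt (A : List (List String)) (K : Int) : Int :=
  A.foldl (fun count row => count + tp K (posAux "P" 0 row) (posAux "T" 0 row)) 0

-- ===== PRECONDITION & SPEC =====
def Spec_solution (A : List (List String)) (K : Int) (out : Int) : Prop := out = solution_alt A K
instance (A : List (List String)) (K : Int) (out : Int) : Decidable (Spec_solution A K out) := by unfold Spec_solution; infer_instance

-- ===== CLAIM (what is proved, stated in full; the proofs are below) =====
def Claim_equal_solution : Prop := ∀ (A : List (List String)) (K : Int), Dom_solution A K → Spec_solution A K (solution A K)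

-- ===== LEMMAS AND PROOFS =====

theorem pos_nil_iff (a : String) (l : List String) : posAux a 0 l = [] ↔ a ∉ l := by
  induction l with
  | nil => simp [posAux]
  | cons x xs ih =>
    simp only [posAux, List.mem_cons]
    by_cases hx : x = a
    · simp [hx]
    · rw [if_neg hx, posAux_shift a 1]
      simp [ih, Ne.symm hx]

theorem pos_pairwise (a : String) (l : List String) : (posAux a 0 l).Pairwise (· < ·) := by
  induction l with
  | nil => simp [posAux]
  | cons x xs ih =>
    simp only [posAux, posAux_shift a 1]
    by_cases hx : x = a
    · simp only [if_pos hx]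
      refine List.Pairwise.cons ?_ ?_
      · intro b hb
        simp only [List.mem_map] at hb
        omega
      · exact (List.pairwise_map).2 (ih.imp (by omega))
    · simp only [if_neg hx]
      exact (List.pairwise_map).2 (ih.imp (by omega))

theorem tp_shift (K : Int) (c : Nat) (n : Nat) : ∀ (ps ts : List Nat),
    ps.length + ts.length ≤ n → (∀ m ∈ ps, c ≤ m) → (∀ m ∈ ts, c ≤ m) →
    tp K (ps.map (· - c)) (ts.map (· - c)) = tp K ps ts := by
  induction n with
  | zero => intro ps ts hl _ _; cases ps <;> cases ts <;> simp_all [tp]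
  | succ e ih =>
    intro ps ts hl hp ht
    cases ps with
    | nil => simp [tp]
    | cons p ps' =>
      cases ts with
      | nil => simp [tp]
      | cons t ts' =>
        have hcp : c ≤ p := hp p List.mem_cons_self
        have hct : c ≤ t := ht t List.mem_cons_self
        have habs : |((p - c : Nat) : Int) - ((t - c : Nat) : Int)| = |(p : Int) - (t : Int)| := by
          rw [Nat.cast_sub hcp, Nat.cast_sub hct]
          congr 1
          ring
        have hlt : (p - c < t - c) = (p < t) := by
          simp only [eq_iff_iff]
          omega
        simp only [List.map_cons, tp, habs, hlt]
        split_ifs with h1 h2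
        · rw [ih ps' ts' (by simp at hl ⊢; omega)
            (fun m hm => hp m (List.mem_cons_of_mem _ hm))
            (fun m hm => ht m (List.mem_cons_of_mem _ hm))]
        · rw [show (t - c) :: List.map (fun x => x - c) ts' = (t :: ts').map (fun x => x - c)
            from rfl]
          exact ih ps' (t :: ts') (by simp at hl ⊢; omega)
            (fun m hm => hp m (List.mem_cons_of_mem _ hm)) ht
        · rw [show (p - c) :: List.map (fun x => x - c) ps' = (p :: ps').map (fun x => x - c)
            from rfl]
          exact ih (p :: ps') ts' (by simp at hl ⊢; omega)
            hp (fun m hm => ht m (List.mem_cons_of_mem _ hm))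

theorem filter_ne_cons_self (j : Nat) (t : List Nat) (hs : (j :: t).Pairwise (· < ·)) :
    (j :: t).filter (fun m => m ≠ j) = t := by
  have h1 : t.filter (fun m => m ≠ j) = t := by
    apply List.filter_eq_self.2
    intro m hm
    have := (List.pairwise_cons.1 hs).1 m hm
    have hmj : m ≠ j := by omega
    simp [hmj]
  rw [List.filter_cons, if_neg (by simp), h1]

theorem filter_ne_of_not_mem (j : Nat) (S : List Nat) (h : j ∉ S) :
    S.filter (fun m => m ≠ j) = S := by
  apply List.filter_eq_self.2
  intro m hm
  have hmj : m ≠ j := fun e => h (e ▸ hm)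
  simp [hmj]

theorem filter_le_of_bound (c : Nat) (S : List Nat) (h : ∀ m ∈ S, c ≤ m) :
    S.filter (fun m => c ≤ m) = S := by
  apply List.filter_eq_self.2
  intro m hm
  simpa using h m hm

theorem loopA_eq (K : Int) (row : List String) (count : Int) :
    loopA K row count = count + tp K (posAux "P" 0 row) (posAux "T" 0 row) := by
  induction row, count using loopA.induct (K := K) with
  | case1 row count hP hp =>
    exact absurd hP ((PySem.List.index?_eq_none_iff row "P").1 hp)
  | case3 row count hP Pj hp hT Tj ht dist ex hK ih =>
    obtain ⟨tP, hposP⟩ := pos_cons_of_index? _ _ _ hp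
    obtain ⟨tT, hposT⟩ := pos_cons_of_index? _ _ _ ht
    have hPl : Pj < row.length := lt_length_of_index? _ _ _ hp
    have hTl' : Tj < (row.set Pj "X").length := by
      simpa using lt_length_of_index? _ _ _ ht
    have hgP : row[Pj]? = some "P" := getElem?_of_index? _ _ _ hp
    have hgT : row[Tj]? = some "T" := getElem?_of_index? _ _ _ ht
    have hpairP := pos_pairwise "P" row
    have hpairT := pos_pairwise "T" row
    rw [hposP] at hpairP
    rw [hposT] at hpairT
    have htailP : ∀ m ∈ tP, Pj < m := (List.pairwise_cons.1 hpairP).1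
    have htailT : ∀ m ∈ tT, Tj < m := (List.pairwise_cons.1 hpairT).1
    have hTnotP : Tj ∉ posAux "P" 0 row := by
      intro hmem
      rw [mem_pos_iff, hgT] at hmem
      simp at hmem
    have hPnotT : Pj ∉ posAux "T" 0 row := by
      intro hmem
      rw [mem_pos_iff, hgP] at hmem
      simp at hmem
    have hexP : min Tj Pj ≤ Pj := Nat.min_le_right Tj Pj
    have hexT : min Tj Pj ≤ Tj := Nat.min_le_left Tj Pj
    have hnewP : posAux "P" 0 (PySem.List.slice ((row.set Pj "X").set Tj "X")
        (some ((min Tj Pj + 1 : Nat) : Int)) none) = tP.map (· - (min Tj Pj + 1)) := by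
      rw [PySem.List.slice_from_natCast, pos_drop, pos_set _ _ _ _ hTl' (by decide),
        pos_set _ _ _ _ hPl (by decide), hposP, filter_ne_cons_self _ _ hpairP,
        filter_ne_of_not_mem Tj tP
          (fun hm => hTnotP (hposP ▸ List.mem_cons_of_mem _ hm)),
        filter_le_of_bound _ _ (fun m hm => by have := htailP m hm; omega)]
    have hnewT : posAux "T" 0 (PySem.List.slice ((row.set Pj "X").set Tj "X")
        (some ((min Tj Pj + 1 : Nat) : Int)) none) = tT.map (· - (min Tj Pj + 1)) := by
      rw [PySem.List.slice_from_natCast, pos_drop, pos_set _ _ _ _ hTl' (by decide),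
        pos_set _ _ _ _ hPl (by decide), filter_ne_of_not_mem Pj _ hPnotT, hposT,
        filter_ne_cons_self _ _ hpairT,
        filter_le_of_bound _ _ (fun m hm => by have := htailT m hm; omega)]
    have hK' : |(Tj : Int) - (Pj : Int)| ≤ K := hK
    rw [loopA, dif_pos hP]
    split
    next heq => rw [hp] at heq; cases heq
    next Pj' heq =>
      rw [hp] at heq
      obtain rfl := Option.some.inj heq
      rw [dif_pos hT]
      split
      next heq2 => rw [ht] at heq2; cases heq2
      next Tj' heq2 =>
        rw [ht] at heq2
        obtain rfl := Option.some.inj heq2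
        rw [if_pos hK', ih, hnewP, hnewT,
          tp_shift K (min Tj Pj + 1) (tP.length + tT.length) tP tT le_rfl
            (fun m hm => by have := htailP m hm; omega)
            (fun m hm => by have := htailT m hm; omega),
          hposP, hposT, tp, if_pos (by rw [abs_sub_comm]; exact hK')]
        ring
  | case4 row count hP Pj hp hT Tj ht dist ex hK ih =>
    obtain ⟨tP, hposP⟩ := pos_cons_of_index? _ _ _ hp
    obtain ⟨tT, hposT⟩ := pos_cons_of_index? _ _ _ ht
    have hPl : Pj < row.length := lt_length_of_index? _ _ _ hp
    have hTl : Tj < row.length := lt_length_of_index? _ _ _ ht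
    have hgP : row[Pj]? = some "P" := getElem?_of_index? _ _ _ hp
    have hgT : row[Tj]? = some "T" := getElem?_of_index? _ _ _ ht
    have hpairP := pos_pairwise "P" row
    have hpairT := pos_pairwise "T" row
    rw [hposP] at hpairP
    rw [hposT] at hpairT
    have hTnotP : Tj ∉ posAux "P" 0 row := by
      intro hmem
      rw [mem_pos_iff, hgT] at hmem
      simp at hmem
    have hPnotT : Pj ∉ posAux "T" 0 row := by
      intro hmem
      rw [mem_pos_iff, hgP] at hmem
      simp at hmem
    have hnePT : Pj ≠ Tj := by
      intro hEq
      rw [hEq, hgT] at hgP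
      simp at hgP
    have hmin : min Tj Pj < row.length := by omega
    have hK' : ¬ |(Tj : Int) - (Pj : Int)| ≤ K := hK
    rw [loopA, dif_pos hP]
    split
    next heq => rw [hp] at heq; cases heq
    next Pj' heq =>
      rw [hp] at heq
      obtain rfl := Option.some.inj heq
      rw [dif_pos hT]
      split
      next heq2 => rw [ht] at heq2; cases heq2
      next Tj' heq2 =>
        rw [ht] at heq2
        obtain rfl := Option.some.inj heq2
        rw [if_neg hK', ih, pos_set _ _ _ _ hmin (by decide), pos_set _ _ _ _ hmin (by decide)]
        rcases min_cases Tj Pj with ⟨hm, hle⟩ | ⟨hm, hlt⟩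
        · have hTltP : Tj < Pj := by omega
          rw [hm, filter_ne_of_not_mem Tj _ hTnotP, hposT, filter_ne_cons_self _ _ hpairT,
            hposP, tp, if_neg (by rw [abs_sub_comm]; exact hK'), if_neg (by omega)]
        · rw [hm, hposP, filter_ne_cons_self _ _ hpairP, filter_ne_of_not_mem Pj _ hPnotT,
            hposT, tp, if_neg (by rw [abs_sub_comm]; exact hK'), if_pos hlt]
  | case5 row count hP Pj hp hT =>
    obtain ⟨tP, hposP⟩ := pos_cons_of_index? _ _ _ hp
    rw [loopA, dif_pos hP]
    split
    next heq => rw [hp] at heq; cases heq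
    next Pj' heq =>
      rw [hp] at heq
      obtain rfl := Option.some.inj heq
      rw [dif_neg hT, (pos_nil_iff "T" row).2 hT, hposP]
      simp [tp]
  | case6 row count hP =>
    rw [loopA, dif_neg hP, (pos_nil_iff "P" row).2 hP]
    simp [tp]
  | case2 row count hP Pj hp hT ht =>
    exact absurd hT ((PySem.List.index?_eq_none_iff row "T").1 ht)

theorem foldl_loopA_eq (K : Int) (rows : List (List String)) (c : Int) :
    rows.foldl (fun count row => loopA K row count) c
      = rows.foldl (fun count row => count + tp K (posAux "P" 0 row) (posAux "T" 0 row)) c := by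
  simp only [loopA_eq]

-- ===== VERDICT (by name: the statement is the Claim_ definition above) =====
theorem solution_spec : Claim_equal_solution := by
  intro A K _
  show solution A K = solution_alt A K
  unfold solution solution_alt
  exact foldl_loopA_eq K A 0
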